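-- pv_equiv track=rewrite | github.com/jadeblaquiere/msgstore | lbr.py | _lbr_reverse
-- ===== SOURCE A (Python) =====
-- def _lbr_reverse(left, right):
--     x = { 'left': [], 'both': [], 'right': []}
--     l = sorted(left, reverse=True)
--     r = sorted(right, reverse=True)
--     il = 0
--     ir = 0
--     while il < len(l) or ir < len(r):
--         while il < len(l) and ((ir >= len(r)) or (l[il] > r[ir])):
--             x['left'].append(l[il])
--             il += 1
--         while il >= len(l) and ir < len(r):
--             x['right'].append(r[ir])
--             ir += 1
--         while il < len(l) and ir < len(r) and l[il] == r[ir]: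
--             x['both'].append(l[il])
--             il += 1
--             ir += 1
--         while ir < len(r) and il < len(l) and r[ir] > l[il]:
--             x['right'].append(r[ir])
--             ir += 1
--         while ir >= len(r) and il < len(l):
--             x['left'].append(l[il])
--             il += 1
--     return x
-- ===== SOURCE B (Python) =====
-- def _lbr_reverse(left, right):
--     cl = {}
--     for v in left:
--         cl[v] = cl.get(v, 0) + 1
--     cr = {}
--     for v in right:
--         cr[v] = cr.get(v, 0) + 1
--     xl, xb, xr = [], [], []
--     for v in sorted(set(left) | set(right), reverse=True):
--         a = cl.get(v, 0)
--         b = cr.get(v, 0)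
--         xb += [v] * min(a, b)
--         if a > b:
--             xl += [v] * (a - b)
--         else:
--             xr += [v] * (b - a)
--     return {'left': xl, 'both': xb, 'right': xr}
-- ===== Notes on version B (the rewrite author's own statement) =====
-- stated objective: idiomatic
-- what changed: A's two-pointer merge over the two descending-sorted lists (an outer while with five inner scanning loops) is replaced by frequency dicts built in one pass each plus one loop over the sorted distinct values that emits min/difference-many copies of each value.
import Mathlib
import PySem

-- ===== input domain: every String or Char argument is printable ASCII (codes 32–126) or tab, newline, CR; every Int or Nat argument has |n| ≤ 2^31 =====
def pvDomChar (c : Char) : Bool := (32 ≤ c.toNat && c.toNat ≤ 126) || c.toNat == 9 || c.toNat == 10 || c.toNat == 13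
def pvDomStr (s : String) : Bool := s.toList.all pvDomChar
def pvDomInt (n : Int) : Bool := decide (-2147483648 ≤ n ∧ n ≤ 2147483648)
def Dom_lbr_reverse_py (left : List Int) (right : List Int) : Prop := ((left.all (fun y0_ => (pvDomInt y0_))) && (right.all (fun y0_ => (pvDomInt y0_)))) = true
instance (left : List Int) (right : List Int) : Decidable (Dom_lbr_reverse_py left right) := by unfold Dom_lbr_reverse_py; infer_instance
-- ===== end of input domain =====

-- B replaces A's five-inner-loop two-pointer merge by per-value frequency counting over the
-- sorted distinct values (objective: simpler); return values are proved equal on all inputs.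

-- ===== PORT A =====
-- A walks the two descending-sorted lists with indices il/ir; we port the index walks as
-- recursion on the not-yet-consumed suffixes of l and r (same state, same branch order).

-- condition of A's inner loop 1: '(ir >= len(r)) or (l[il] > r[ir])'
def w1cond (rs : List Int) (a : Int) : Bool :=
  match rs with
  | [] => true
  | b :: _ => decide (b < a)

-- inner loop 1: 'while il < len(l) and (ir >= len(r) or l[il] > r[ir]): x["left"].append(l[il]); il += 1'
def w1 : List Int → List Int → List Int → List Int × List Int
  | a :: ls, rs, xl => if w1cond rs a then w1 ls rs (xl ++ [a]) else (a :: ls, xl)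
  | [], _, xl => ([], xl)

-- inner loop 2: 'while il >= len(l) and ir < len(r): x["right"].append(r[ir]); ir += 1'
def w2 : List Int → List Int → List Int → List Int × List Int
  | ls, b :: rs, xr => if ls.isEmpty then w2 ls rs (xr ++ [b]) else (b :: rs, xr)
  | _, [], xr => ([], xr)

-- inner loop 3: 'while il < len(l) and ir < len(r) and l[il] == r[ir]: x["both"].append(l[il]); il += 1; ir += 1'
def w3 : List Int → List Int → List Int → List Int × List Int × List Int
  | a :: ls, b :: rs, xb => if a = b then w3 ls rs (xb ++ [a]) else (a :: ls, b :: rs, xb)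
  | [], rs, xb => ([], rs, xb)
  | ls, [], xb => (ls, [], xb)

-- condition of A's inner loop 4: 'il < len(l) and r[ir] > l[il]'
def w4cond (ls : List Int) (b : Int) : Bool :=
  match ls with
  | [] => false
  | a :: _ => decide (a < b)

-- inner loop 4: 'while ir < len(r) and il < len(l) and r[ir] > l[il]: x["right"].append(r[ir]); ir += 1'
def w4 : List Int → List Int → List Int → List Int × List Int
  | ls, b :: rs, xr => if w4cond ls b then w4 ls rs (xr ++ [b]) else (b :: rs, xr)
  | _, [], xr => ([], xr)

-- inner loop 5: 'while ir >= len(r) and il < len(l): x["left"].append(l[il]); il += 1'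
def w5 : List Int → List Int → List Int → List Int × List Int
  | a :: ls, rs, xl => if rs.isEmpty then w5 ls rs (xl ++ [a]) else (a :: ls, xl)
  | [], _, xl => ([], xl)

-- closed forms of the five inner loops (needed by the termination argument of the outer loop)
theorem w1_spec (ls rs xl : List Int) :
    w1 ls rs xl = (ls.dropWhile (w1cond rs), xl ++ ls.takeWhile (w1cond rs)) := by
  induction ls generalizing xl with
  | nil => simp [w1]
  | cons a ls ih =>
    simp only [w1, List.dropWhile_cons, List.takeWhile_cons]
    cases hc : w1cond rs a <;> simp [hc, ih]

theorem w2_spec (ls rs xr : List Int) :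
    w2 ls rs xr = if ls.isEmpty then ([], xr ++ rs) else (rs, xr) := by
  induction rs generalizing xr with
  | nil => cases ls <;> simp [w2]
  | cons b rs ih =>
    cases ls with
    | nil => simp [w2, ih]
    | cons a ls => simp [w2]

-- length of the common equal prefix popped by inner loop 3
def eqp : List Int → List Int → Nat
  | a :: ls, b :: rs => if a = b then eqp ls rs + 1 else 0
  | [], _ => 0
  | _, [] => 0

theorem w3_spec (ls rs xb : List Int) :
    w3 ls rs xb = (ls.drop (eqp ls rs), rs.drop (eqp ls rs), xb ++ ls.take (eqp ls rs)) := by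
  induction ls generalizing rs xb with
  | nil => simp [w3, eqp]
  | cons a ls ih =>
    cases rs with
    | nil => simp [w3, eqp]
    | cons b rs =>
      simp only [w3, eqp]
      by_cases hab : a = b <;> simp [hab, ih]

theorem w4_spec (ls rs xr : List Int) :
    w4 ls rs xr = (rs.dropWhile (w4cond ls), xr ++ rs.takeWhile (w4cond ls)) := by
  induction rs generalizing xr with
  | nil => simp [w4]
  | cons b rs ih =>
    simp only [w4, List.dropWhile_cons, List.takeWhile_cons]
    cases hc : w4cond ls b <;> simp [hc, ih]

theorem w5_spec (ls rs xl : List Int) :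
    w5 ls rs xl = if rs.isEmpty then ([], xl ++ ls) else (ls, xl) := by
  induction ls generalizing xl with
  | nil => cases rs <;> simp [w5]
  | cons a ls ih =>
    cases rs with
    | nil => simp [w5, ih]
    | cons b rs => simp [w5]

theorem eqp_le_left (ls rs : List Int) : eqp ls rs ≤ ls.length := by
  induction ls generalizing rs with
  | nil => simp [eqp]
  | cons a ls ih =>
    cases rs with
    | nil => simp [eqp]
    | cons b rs =>
      simp only [eqp]
      by_cases hab : a = b <;> simp [hab] <;> exact ih rs

theorem eqp_pos (a : Int) (ls rs : List Int) : 0 < eqp (a :: ls) (a :: rs) := by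
  simp [eqp]

theorem w2_fst_le (ls rs xr : List Int) : (w2 ls rs xr).1.length ≤ rs.length := by
  rw [w2_spec]; split <;> simp

theorem w3_fst_le (ls rs xb : List Int) : (w3 ls rs xb).1.length ≤ ls.length := by
  rw [w3_spec]; simp

theorem w3_snd_le (ls rs xb : List Int) : (w3 ls rs xb).2.1.length ≤ rs.length := by
  rw [w3_spec]; simp

theorem w4_fst_le (ls rs xr : List Int) : (w4 ls rs xr).1.length ≤ rs.length := by
  rw [w4_spec]; simpa using List.length_dropWhile_le (p := w4cond ls) (l := rs)

theorem w5_fst_le (ls rs xl : List Int) : (w5 ls rs xl).1.length ≤ ls.length := by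
  rw [w5_spec]; split <;> simp

-- every round of A's outer loop consumes at least one element of l or r
theorem loopA_progress (ls rs xl xb xr : List Int) (h : ¬(ls = [] ∧ rs = [])) :
    (w5 (w3 (w1 ls rs xl).1 (w2 (w1 ls rs xl).1 rs xr).1 xb).1
        (w4 (w3 (w1 ls rs xl).1 (w2 (w1 ls rs xl).1 rs xr).1 xb).1
            (w3 (w1 ls rs xl).1 (w2 (w1 ls rs xl).1 rs xr).1 xb).2.1
            (w2 (w1 ls rs xl).1 rs xr).2).1
        (w1 ls rs xl).2).1.length +
    (w4 (w3 (w1 ls rs xl).1 (w2 (w1 ls rs xl).1 rs xr).1 xb).1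
        (w3 (w1 ls rs xl).1 (w2 (w1 ls rs xl).1 rs xr).1 xb).2.1
        (w2 (w1 ls rs xl).1 rs xr).2).1.length < ls.length + rs.length := by
  have B2 := w2_fst_le (w1 ls rs xl).1 rs xr
  have B3 := w3_fst_le (w1 ls rs xl).1 (w2 (w1 ls rs xl).1 rs xr).1 xb
  have B3' := w3_snd_le (w1 ls rs xl).1 (w2 (w1 ls rs xl).1 rs xr).1 xb
  have B4 := w4_fst_le (w3 (w1 ls rs xl).1 (w2 (w1 ls rs xl).1 rs xr).1 xb).1
      (w3 (w1 ls rs xl).1 (w2 (w1 ls rs xl).1 rs xr).1 xb).2.1 (w2 (w1 ls rs xl).1 rs xr).2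
  have B5 := w5_fst_le (w3 (w1 ls rs xl).1 (w2 (w1 ls rs xl).1 rs xr).1 xb).1
      (w4 (w3 (w1 ls rs xl).1 (w2 (w1 ls rs xl).1 rs xr).1 xb).1
          (w3 (w1 ls rs xl).1 (w2 (w1 ls rs xl).1 rs xr).1 xb).2.1
          (w2 (w1 ls rs xl).1 rs xr).2).1 (w1 ls rs xl).2
  cases ls with
  | nil =>
    cases rs with
    | nil => exact absurd ⟨rfl, rfl⟩ h
    | cons b rs' =>
      have hL1 : (w1 ([] : List Int) (b :: rs') xl).1 = [] := by rw [w1_spec]; simp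
      rw [hL1] at B2 B3 B3' B4 B5 ⊢
      have hR1 : (w2 ([] : List Int) (b :: rs') xr).1 = [] := by rw [w2_spec]; simp
      rw [hR1] at B3 B3' B4 B5 ⊢
      simp only [List.length_nil, List.length_cons] at *
      omega
  | cons a ls' =>
    cases rs with
    | nil =>
      have hL1 : (w1 (a :: ls') ([] : List Int) xl).1 = [] := by
        rw [w1_spec]
        have : List.dropWhile (w1cond []) (a :: ls') = [] := by
          rw [List.dropWhile_eq_nil_iff]; intro x _; rfl
        simp [this]
      rw [hL1] at B2 B3 B3' B4 B5 ⊢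
      simp only [List.length_nil, List.length_cons] at B2 B3 B3' B4 B5 ⊢
      omega
    | cons b rs' =>
      rcases lt_trichotomy b a with hba | hba | hba
      · -- l[il] > r[ir]: loop 1 consumes at least the head of l
        have hS : (w1 (a :: ls') (b :: rs') xl).1.length ≤ ls'.length := by
          rw [w1_spec]
          have hc : w1cond (b :: rs') a = true := by simp [w1cond, hba]
          simpa [List.dropWhile_cons, hc] using
            List.length_dropWhile_le (p := w1cond (b :: rs')) (l := ls')
        simp only [List.length_cons] at *
        omega
      · -- equal heads: loop 3 consumes at least one element of each
        have hL1 : (w1 (a :: ls') (b :: rs') xl).1 = a :: ls' := by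
          rw [w1_spec]
          have hc : w1cond (b :: rs') a = false := by simp [w1cond, hba]
          simp [List.dropWhile_cons, hc]
        have hR1 : (w2 (a :: ls') (b :: rs') xr).1 = b :: rs' := by
          rw [w2_spec]; simp
        rw [hL1] at B2 B3 B3' B4 B5 ⊢
        rw [hR1] at B3 B3' B4 B5 ⊢
        have hk := eqp_pos a ls' rs'
        have hkl := eqp_le_left (a :: ls') (a :: rs')
        have h3 : (w3 (a :: ls') (b :: rs') xb).1.length
            = (a :: ls').length - eqp (a :: ls') (b :: rs') := by
          rw [w3_spec]; simp
        have h3' : (w3 (a :: ls') (b :: rs') xb).2.1.length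
            = (b :: rs').length - eqp (a :: ls') (b :: rs') := by
          rw [w3_spec]; simp
        subst hba
        simp only [List.length_cons] at *
        omega
      · -- r[ir] > l[il]: loop 4 consumes at least the head of r
        have hL1 : (w1 (a :: ls') (b :: rs') xl).1 = a :: ls' := by
          rw [w1_spec]
          have hc : w1cond (b :: rs') a = false := by
            simp only [w1cond, decide_eq_false_iff_not]; omega
          simp [List.dropWhile_cons, hc]
        have hR1 : (w2 (a :: ls') (b :: rs') xr).1 = b :: rs' := by
          rw [w2_spec]; simp
        rw [hL1] at B2 B3 B3' B4 B5 ⊢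
        rw [hR1] at B3 B3' B4 B5 ⊢
        have hk : eqp (a :: ls') (b :: rs') = 0 := by
          have : a ≠ b := by omega
          simp [eqp, this]
        have h3 : (w3 (a :: ls') (b :: rs') xb).1 = a :: ls' := by
          rw [w3_spec, hk]; simp
        have h3' : (w3 (a :: ls') (b :: rs') xb).2.1 = b :: rs' := by
          rw [w3_spec, hk]; simp
        rw [h3, h3'] at B4 B5 ⊢
        have h4 : (w4 (a :: ls') (b :: rs') (w2 (a :: ls') (b :: rs') xr).2).1.length
            ≤ rs'.length := by
          rw [w4_spec]
          have hc : w4cond (a :: ls') b = true := by simp [w4cond, hba]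
          simpa [List.dropWhile_cons, hc] using
            List.length_dropWhile_le (p := w4cond (a :: ls')) (l := rs')
        simp only [List.length_cons] at *
        omega

-- outer loop: 'while il < len(l) or ir < len(r)', running the five inner loops in order
def loopA (ls rs xl xb xr : List Int) : List Int × List Int × List Int :=
  if h : ls = [] ∧ rs = [] then (xl, xb, xr)
  else
    loopA (w5 (w3 (w1 ls rs xl).1 (w2 (w1 ls rs xl).1 rs xr).1 xb).1
              (w4 (w3 (w1 ls rs xl).1 (w2 (w1 ls rs xl).1 rs xr).1 xb).1
                  (w3 (w1 ls rs xl).1 (w2 (w1 ls rs xl).1 rs xr).1 xb).2.1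
                  (w2 (w1 ls rs xl).1 rs xr).2).1
              (w1 ls rs xl).2).1
          (w4 (w3 (w1 ls rs xl).1 (w2 (w1 ls rs xl).1 rs xr).1 xb).1
              (w3 (w1 ls rs xl).1 (w2 (w1 ls rs xl).1 rs xr).1 xb).2.1
              (w2 (w1 ls rs xl).1 rs xr).2).1
          (w5 (w3 (w1 ls rs xl).1 (w2 (w1 ls rs xl).1 rs xr).1 xb).1
              (w4 (w3 (w1 ls rs xl).1 (w2 (w1 ls rs xl).1 rs xr).1 xb).1
                  (w3 (w1 ls rs xl).1 (w2 (w1 ls rs xl).1 rs xr).1 xb).2.1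
                  (w2 (w1 ls rs xl).1 rs xr).2).1
              (w1 ls rs xl).2).2
          (w3 (w1 ls rs xl).1 (w2 (w1 ls rs xl).1 rs xr).1 xb).2.2
          (w4 (w3 (w1 ls rs xl).1 (w2 (w1 ls rs xl).1 rs xr).1 xb).1
              (w3 (w1 ls rs xl).1 (w2 (w1 ls rs xl).1 rs xr).1 xb).2.1
              (w2 (w1 ls rs xl).1 rs xr).2).2
termination_by ls.length + rs.length
decreasing_by exact loopA_progress ls rs xl xb xr h

def lbr_reverse_py (left : List Int) (right : List Int) : List (String × List Int) :=
  let l := PySem.List.sorted left (fun x => x) true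
  let r := PySem.List.sorted right (fun x => x) true
  let res := loopA l r [] [] []
  [("left", res.1), ("both", res.2.1), ("right", res.2.2)]

-- ===== PORT B =====
-- body of B's 'for v in sorted(set(left) | set(right), reverse=True)' loop
def bStep (cl cr : PySem.Dict Int Int) (acc : List Int × List Int × List Int) (v : Int) :
    List Int × List Int × List Int :=
  let a := cl.getD v 0
  let b := cr.getD v 0
  let xb := acc.2.1 ++ PySem.List.pyRepeat [v] (min a b)
  if b < a then (acc.1 ++ PySem.List.pyRepeat [v] (a - b), xb, acc.2.2)
  else (acc.1, xb, acc.2.2 ++ PySem.List.pyRepeat [v] (b - a))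

def lbr_reverse_py_alt (left : List Int) (right : List Int) : List (String × List Int) :=
  -- 'cl[v] = cl.get(v, 0) + 1' loops: the PySem counting-dict update
  let cl := left.foldl (fun d v => d.modify v 0 (· + 1)) PySem.Dict.empty
  let cr := right.foldl (fun d v => d.modify v 0 (· + 1)) PySem.Dict.empty
  let keys := PySem.List.sorted (PySem.Set.union (PySem.Set.ofList left) (PySem.Set.ofList right)) (fun x => x) true
  let res := keys.foldl (bStep cl cr) ([], [], [])
  [("left", res.1), ("both", res.2.1), ("right", res.2.2)]

-- ===== PRECONDITION & SPEC =====
def Spec_lbr_reverse_py (left : List Int) (right : List Int) (out : List (String × List Int)) : Prop := out = lbr_reverse_py_alt left right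
instance (left : List Int) (right : List Int) (out : List (String × List Int)) : Decidable (Spec_lbr_reverse_py left right out) := by unfold Spec_lbr_reverse_py; infer_instance

-- ===== CLAIM (what is proved, stated in full; the proofs are below) =====
def Claim_equal_lbr_reverse_py : Prop := ∀ (left : List Int) (right : List Int), Dom_lbr_reverse_py left right → Spec_lbr_reverse_py left right (lbr_reverse_py left right)

-- ===== LEMMAS AND PROOFS =====

-- the element-wise merge of two descending lists (proof-side reference function)
def mergeSpec : List Int → List Int → List Int × List Int × List Int
  | [], rs => ([], [], rs)
  | a :: ls, [] => (a :: ls, [], [])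
  | a :: ls, b :: rs =>
    if b < a then
      let m := mergeSpec ls (b :: rs); (a :: m.1, m.2.1, m.2.2)
    else if a = b then
      let m := mergeSpec ls rs; (m.1, a :: m.2.1, m.2.2)
    else
      let m := mergeSpec (a :: ls) rs; (m.1, m.2.1, b :: m.2.2)
termination_by ls rs => ls.length + rs.length

theorem mergeSpec_nil_left (rs : List Int) : mergeSpec [] rs = ([], [], rs) := by
  simp [mergeSpec]

theorem mergeSpec_nil_right (ls : List Int) : mergeSpec ls [] = (ls, [], []) := by
  cases ls <;> simp [mergeSpec]

theorem mergeSpec_left_prefix (p ls rs : List Int) (h : ∀ a ∈ p, w1cond rs a = true) :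
    mergeSpec (p ++ ls) rs
      = (p ++ (mergeSpec ls rs).1, (mergeSpec ls rs).2.1, (mergeSpec ls rs).2.2) := by
  cases rs with
  | nil => simp [mergeSpec_nil_right]
  | cons b rs' =>
    induction p with
    | nil => simp
    | cons a p ih =>
      have hc : b < a := by
        have := h a (by simp)
        simpa [w1cond] using this
      have hrec := ih (fun x hx => h x (by simp [hx]))
      simp only [List.cons_append, mergeSpec, if_pos hc]
      simp [hrec]

theorem mergeSpec_right_prefix (q ls rs : List Int) (h : ∀ b ∈ q, w4cond ls b = true) :
    mergeSpec ls (q ++ rs)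
      = ((mergeSpec ls rs).1, (mergeSpec ls rs).2.1, q ++ (mergeSpec ls rs).2.2) := by
  induction q with
  | nil => simp
  | cons b q ih =>
    have hcb := h b (by simp)
    cases ls with
    | nil => simp [w4cond] at hcb
    | cons a ls' =>
      have hab : a < b := by simpa [w4cond] using hcb
      have hrec := ih (fun x hx => h x (by simp [hx]))
      simp only [List.cons_append, mergeSpec, if_neg (by omega : ¬ b < a),
        if_neg (by omega : ¬ a = b)]
      simp [hrec]

theorem mergeSpec_both_prefix (p ls rs : List Int) :
    mergeSpec (p ++ ls) (p ++ rs)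
      = ((mergeSpec ls rs).1, p ++ (mergeSpec ls rs).2.1, (mergeSpec ls rs).2.2) := by
  induction p with
  | nil => simp
  | cons a p ih =>
    simp only [List.cons_append, mergeSpec, if_neg (lt_irrefl a), if_pos rfl]
    simp [ih]

theorem take_eqp_eq (ls rs : List Int) : ls.take (eqp ls rs) = rs.take (eqp ls rs) := by
  induction ls generalizing rs with
  | nil => simp [eqp]
  | cons a ls ih =>
    cases rs with
    | nil => simp [eqp]
    | cons b rs =>
      simp only [eqp]
      by_cases hab : a = b
      · simp only [hab, if_true, List.take_succ_cons]
        rw [ih rs]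
      · simp [hab]

-- A's outer loop appends exactly the element-wise merge to the three accumulators
theorem loopA_merge_aux : ∀ (n : Nat) (ls rs xl xb xr : List Int), ls.length + rs.length ≤ n →
    loopA ls rs xl xb xr
      = (xl ++ (mergeSpec ls rs).1, xb ++ (mergeSpec ls rs).2.1, xr ++ (mergeSpec ls rs).2.2) := by
  intro n
  induction n with
  | zero =>
    intro ls rs xl xb xr hn
    have hls : ls = [] := by cases ls <;> simp_all
    have hrs : rs = [] := by cases rs <;> simp_all
    subst hls; subst hrs
    rw [loopA, dif_pos ⟨rfl, rfl⟩]
    simp [mergeSpec_nil_left]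
  | succ n ih =>
    intro ls rs xl xb xr hn
    by_cases h : ls = [] ∧ rs = []
    · obtain ⟨rfl, rfl⟩ := h
      rw [loopA, dif_pos ⟨rfl, rfl⟩]
      simp [mergeSpec_nil_left]
    · rw [loopA, dif_neg h]
      have hprog := loopA_progress ls rs xl xb xr h
      simp only [w1_spec, w2_spec, w3_spec, w4_spec, w5_spec] at hprog ⊢
      cases h1 : (List.dropWhile (w1cond rs) ls).isEmpty with
      | true =>
        have he : List.dropWhile (w1cond rs) ls = [] := by simpa using h1
        simp only [h1, he, if_true] at hprog ⊢
        simp [eqp] at hprog ⊢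
        rw [loopA, dif_pos ⟨rfl, rfl⟩]
        have hM : mergeSpec ls rs = (List.takeWhile (w1cond rs) ls, ([] : List Int), rs) := by
          conv_lhs => rw [← List.takeWhile_append_dropWhile (p := w1cond rs) (l := ls), he]
          rw [mergeSpec_left_prefix _ [] rs (fun a ha => List.mem_takeWhile_imp ha)]
          simp [mergeSpec_nil_left]
        rw [hM]
        simp
      | false =>
        simp only [h1, Bool.false_eq_true, if_false] at hprog ⊢
        have hsplit1 : ls = List.takeWhile (w1cond rs) ls ++ List.dropWhile (w1cond rs) ls :=
          (List.takeWhile_append_dropWhile).symm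
        have ht1 : ∀ a ∈ List.takeWhile (w1cond rs) ls, w1cond rs a = true :=
          fun a ha => List.mem_takeWhile_imp ha
        generalize hT1 : List.takeWhile (w1cond rs) ls = T1 at *
        generalize hL1 : List.dropWhile (w1cond rs) ls = L1 at *
        have hpeq := take_eqp_eq L1 rs
        have hsplit2 : L1 = L1.take (eqp L1 rs) ++ L1.drop (eqp L1 rs) :=
          (List.take_append_drop _ _).symm
        have hsplitrs : rs = L1.take (eqp L1 rs) ++ rs.drop (eqp L1 rs) := by
          rw [hpeq]; exact (List.take_append_drop _ _).symm
        generalize hP : L1.take (eqp L1 rs) = P at *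
        generalize hL2 : L1.drop (eqp L1 rs) = L2 at *
        generalize hR2 : rs.drop (eqp L1 rs) = R2 at *
        have ht4 : ∀ b ∈ List.takeWhile (w4cond L2) R2, w4cond L2 b = true :=
          fun b hb => List.mem_takeWhile_imp hb
        have hsplit3 : R2 = List.takeWhile (w4cond L2) R2 ++ List.dropWhile (w4cond L2) R2 :=
          (List.takeWhile_append_dropWhile).symm
        generalize hT4 : List.takeWhile (w4cond L2) R2 = T4 at *
        generalize hR3 : List.dropWhile (w4cond L2) R2 = R3 at *
        have hM : mergeSpec ls rs
            = (T1 ++ (mergeSpec L2 R3).1, P ++ (mergeSpec L2 R3).2.1,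
               T4 ++ (mergeSpec L2 R3).2.2) := by
          rw [hsplit1, mergeSpec_left_prefix T1 L1 rs ht1, hsplit2, hsplitrs,
            mergeSpec_both_prefix P L2 R2, hsplit3, mergeSpec_right_prefix T4 L2 R3 ht4]
        rw [hM]
        cases h5 : R3.isEmpty with
        | true =>
          have hR3e : R3 = [] := by simpa using h5
          subst hR3e
          simp only [List.isEmpty_nil, if_true]
          rw [loopA, dif_pos ⟨rfl, rfl⟩]
          simp [mergeSpec_nil_right]
        | false =>
          simp only [h5, Bool.false_eq_true, if_false] at hprog ⊢
          have hb : L2.length + R3.length ≤ n := by omega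
          rw [ih L2 R3 _ _ _ hb]
          simp

theorem loopA_merge (ls rs xl xb xr : List Int) :
    loopA ls rs xl xb xr
      = (xl ++ (mergeSpec ls rs).1, xb ++ (mergeSpec ls rs).2.1, xr ++ (mergeSpec ls rs).2.2) :=
  loopA_merge_aux (ls.length + rs.length) ls rs xl xb xr le_rfl

-- B-side reference step: append the three per-value blocks
def specStep (cl cr : Int → Nat) (acc : List Int × List Int × List Int) (v : Int) :
    List Int × List Int × List Int :=
  (acc.1 ++ List.replicate (cl v - cr v) v,
   acc.2.1 ++ List.replicate (min (cl v) (cr v)) v,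
   acc.2.2 ++ List.replicate (cr v - cl v) v)

theorem bStep_eq_specStep (left right : List Int) (acc : List Int × List Int × List Int) (v : Int) :
    bStep (left.foldl (fun d v => d.modify v 0 (· + 1)) PySem.Dict.empty)
        (right.foldl (fun d v => d.modify v 0 (· + 1)) PySem.Dict.empty) acc v
      = specStep (fun u => left.count u) (fun u => right.count u) acc v := by
  unfold bStep specStep
  rw [PySem.Dict.getD_foldl_modify_add_one, PySem.Dict.getD_foldl_modify_add_one]
  simp only [PySem.Dict.getD_empty, zero_add, PySem.List.pyRepeat_singleton]
  have hmin : (min ((left.count v : Int)) ((right.count v : Int))).toNat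
      = min (left.count v) (right.count v) := by omega
  have hab : (((left.count v) : Int) - ((right.count v) : Int)).toNat
      = left.count v - right.count v := by omega
  have hba : (((right.count v) : Int) - ((left.count v) : Int)).toNat
      = right.count v - left.count v := by omega
  rw [hmin, hab, hba]
  by_cases hlt : ((right.count v : Int)) < ((left.count v : Int))
  · rw [if_pos hlt]
    have : right.count v - left.count v = 0 := by omega
    simp [this]
  · rw [if_neg hlt]
    have : left.count v - right.count v = 0 := by omega
    simp [this]

theorem specStep_shift (cl cr : Int → Nat) (keys : List Int) (xl xb xr : List Int) :
    keys.foldl (specStep cl cr) (xl, xb, xr)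
      = (xl ++ (keys.foldl (specStep cl cr) ([], [], [])).1,
         xb ++ (keys.foldl (specStep cl cr) ([], [], [])).2.1,
         xr ++ (keys.foldl (specStep cl cr) ([], [], [])).2.2) := by
  induction keys generalizing xl xb xr with
  | nil => simp
  | cons v keys ih =>
    simp only [List.foldl_cons]
    rw [show specStep cl cr (xl, xb, xr) v
        = (xl ++ List.replicate (cl v - cr v) v, xb ++ List.replicate (min (cl v) (cr v)) v,
           xr ++ List.replicate (cr v - cl v) v) from rfl,
      show specStep cl cr ([], [], []) v
        = (List.replicate (cl v - cr v) v, List.replicate (min (cl v) (cr v)) v,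
           List.replicate (cr v - cl v) v) by simp [specStep]]
    rw [ih, ih (List.replicate (cl v - cr v) v) (List.replicate (min (cl v) (cr v)) v)
        (List.replicate (cr v - cl v) v)]
    simp

-- a descending list whose elements are ≤ v starts with its block of v's
theorem desc_block (ls : List Int) (v : Int) (h : ls.Pairwise (· ≥ ·)) (hle : ∀ x ∈ ls, x ≤ v) :
    ∃ tl, ls = List.replicate (ls.count v) v ++ tl ∧ (∀ x ∈ tl, x < v) ∧ tl.Pairwise (· ≥ ·) := by
  induction ls with
  | nil => exact ⟨[], by simp⟩
  | cons a ls ih =>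
    rcases List.pairwise_cons.mp h with ⟨hge, hp⟩
    by_cases hav : a = v
    · subst hav
      obtain ⟨tl, h1, h2, h3⟩ := ih hp (fun x hx => hle x (by simp [hx]))
      refine ⟨tl, ?_, h2, h3⟩
      rw [List.count_cons_self, List.replicate_succ, List.cons_append]
      exact congrArg (a :: ·) h1
    · have hav' : a < v := lt_of_le_of_ne (hle a (by simp)) hav
      have hnc : (a :: ls).count v = 0 := by
        rw [List.count_eq_zero]
        intro hv
        rcases List.mem_cons.mp hv with h' | h'
        · exact hav h'.symm
        · exact absurd (le_trans (le_of_eq rfl) (hge v h')) (by omega)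
      refine ⟨a :: ls, by simp [hnc], ?_, h⟩
      intro x hx
      rcases List.mem_cons.mp hx with h' | h'
      · omega
      · exact lt_of_le_of_lt (hge x h') hav'

theorem mergeSpec_block (v : Int) (a b : Nat) (ls rs : List Int)
    (hl : ∀ x ∈ ls, x < v) (hr : ∀ x ∈ rs, x < v) :
    mergeSpec (List.replicate a v ++ ls) (List.replicate b v ++ rs)
      = (List.replicate (a - b) v ++ (mergeSpec ls rs).1,
         List.replicate (min a b) v ++ (mergeSpec ls rs).2.1,
         List.replicate (b - a) v ++ (mergeSpec ls rs).2.2) := by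
  rcases Nat.le_total a b with hab | hab
  · have h1 : List.replicate b v = List.replicate a v ++ List.replicate (b - a) v := by
      rw [← List.replicate_add]; congr 1; omega
    rw [h1, List.append_assoc, mergeSpec_both_prefix]
    have h2 : mergeSpec ls (List.replicate (b - a) v ++ rs)
        = ((mergeSpec ls rs).1, (mergeSpec ls rs).2.1,
           List.replicate (b - a) v ++ (mergeSpec ls rs).2.2) := by
      cases ls with
      | nil => simp [mergeSpec_nil_left]
      | cons x ls' =>
        apply mergeSpec_right_prefix
        intro u hu
        have huv := List.eq_of_mem_replicate hu
        subst huv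
        have := hl x (by simp)
        simp [w4cond]
        omega
    rw [h2]
    have hmin : min a b = a := by omega
    have hsub : a - b = 0 := by omega
    simp [hmin, hsub]
  · have h1 : List.replicate a v = List.replicate b v ++ List.replicate (a - b) v := by
      rw [← List.replicate_add]; congr 1; omega
    rw [h1, List.append_assoc, mergeSpec_both_prefix]
    have h2 : mergeSpec (List.replicate (a - b) v ++ ls) rs
        = (List.replicate (a - b) v ++ (mergeSpec ls rs).1, (mergeSpec ls rs).2.1,
           (mergeSpec ls rs).2.2) := by
      apply mergeSpec_left_prefix
      intro u hu
      have huv := List.eq_of_mem_replicate hu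
      subst huv
      cases rs with
      | nil => rfl
      | cons y rs' =>
        have := hr y (by simp)
        simp [w1cond]
        omega
    rw [h2]
    have hmin : min a b = b := by omega
    have hsub : b - a = 0 := by omega
    simp [hmin, hsub]

theorem merge_fold (keys : List Int) : ∀ (ls rs : List Int),
    keys.Pairwise (· > ·) → ls.Pairwise (· ≥ ·) → rs.Pairwise (· ≥ ·) →
    (∀ x ∈ ls, x ∈ keys) → (∀ x ∈ rs, x ∈ keys) →
    keys.foldl (specStep (fun v => ls.count v) (fun v => rs.count v)) ([], [], [])
      = mergeSpec ls rs := by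
  induction keys with
  | nil =>
    intro ls rs _ _ _ hml hmr
    have hls : ls = [] := by
      cases ls with
      | nil => rfl
      | cons x l => exact absurd (hml x (by simp)) (by simp)
    have hrs : rs = [] := by
      cases rs with
      | nil => rfl
      | cons x l => exact absurd (hmr x (by simp)) (by simp)
    subst hls; subst hrs
    simp [mergeSpec_nil_left]
  | cons v keys ih =>
    intro ls rs hk hpl hpr hml hmr
    rcases List.pairwise_cons.mp hk with ⟨hvk, hk'⟩
    have hlel : ∀ x ∈ ls, x ≤ v := by
      intro x hx
      rcases List.mem_cons.mp (hml x hx) with h | h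
      · exact le_of_eq h
      · exact le_of_lt (hvk x h)
    have hler : ∀ x ∈ rs, x ≤ v := by
      intro x hx
      rcases List.mem_cons.mp (hmr x hx) with h | h
      · exact le_of_eq h
      · exact le_of_lt (hvk x h)
    obtain ⟨tl, hlsd, htl, hptl⟩ := desc_block ls v hpl hlel
    obtain ⟨tr, hrsd, htr, hptr⟩ := desc_block rs v hpr hler
    have hmtl : ∀ x ∈ tl, x ∈ keys := by
      intro x hx
      have hxl : x ∈ ls := by rw [hlsd]; exact List.mem_append_right _ hx
      rcases List.mem_cons.mp (hml x hxl) with h | h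
      · exact absurd h (by have := htl x hx; omega)
      · exact h
    have hmtr : ∀ x ∈ tr, x ∈ keys := by
      intro x hx
      have hxr : x ∈ rs := by rw [hrsd]; exact List.mem_append_right _ hx
      rcases List.mem_cons.mp (hmr x hxr) with h | h
      · exact absurd h (by have := htr x hx; omega)
      · exact h
    have hcl : ∀ u, u ≠ v → ls.count u = tl.count u := by
      intro u hu
      conv_lhs => rw [hlsd]
      rw [List.count_append, List.count_replicate]
      simp [hu, Ne.symm hu]
    have hcr : ∀ u, u ≠ v → rs.count u = tr.count u := by
      intro u hu
      conv_lhs => rw [hrsd]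
      rw [List.count_append, List.count_replicate]
      simp [hu, Ne.symm hu]
    rw [List.foldl_cons,
      show specStep (fun w => ls.count w) (fun w => rs.count w) ([], [], []) v
        = (List.replicate (ls.count v - rs.count v) v,
           List.replicate (min (ls.count v) (rs.count v)) v,
           List.replicate (rs.count v - ls.count v) v) by simp [specStep],
      specStep_shift,
      PySem.List.foldl_congr_mem keys
        (specStep (fun w => ls.count w) (fun w => rs.count w))
        (specStep (fun w => tl.count w) (fun w => tr.count w)) ([], [], [])
        (by
          intro acc u hu
          have huv : u ≠ v := by have := hvk u hu; omega
          simp [specStep, hcl u huv, hcr u huv]),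
      ih tl tr hk' hptl hptr hmtl hmtr]
    conv_rhs => rw [hlsd, hrsd]
    rw [mergeSpec_block v (ls.count v) (rs.count v) tl tr htl htr]

-- the two ports agree
theorem lbr_ports_eq (left right : List Int) :
    lbr_reverse_py left right = lbr_reverse_py_alt left right := by
  have hA : loopA (PySem.List.sorted left (fun x => x) true)
        (PySem.List.sorted right (fun x => x) true) [] [] []
      = mergeSpec (PySem.List.sorted left (fun x => x) true)
          (PySem.List.sorted right (fun x => x) true) := by
    rw [loopA_merge]; simp
  have hkeysp : (PySem.List.sorted
      (PySem.Set.union (PySem.Set.ofList left) (PySem.Set.ofList right))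
      (fun x => x) true).Pairwise (· > ·) := by
    have h1 := PySem.List.sorted_pairwise_rev
      (PySem.Set.union (PySem.Set.ofList left) (PySem.Set.ofList right)) (fun x : Int => x)
    have h2 : (PySem.List.sorted
        (PySem.Set.union (PySem.Set.ofList left) (PySem.Set.ofList right))
        (fun x : Int => x) true).Nodup :=
      (PySem.List.sorted_perm _ _ _).nodup_iff.mpr
        (PySem.Set.nodup_union _ _ (PySem.Set.nodup_ofList left))
    exact (h1.and h2).imp (fun h => lt_of_le_of_ne h.1 (Ne.symm h.2))
  have hmem : ∀ (xs : List Int), (∀ x ∈ xs, x ∈ left ∨ x ∈ right) →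
      ∀ x ∈ PySem.List.sorted xs (fun x => x) true,
        x ∈ PySem.List.sorted
          (PySem.Set.union (PySem.Set.ofList left) (PySem.Set.ofList right))
          (fun x => x) true := by
    intro xs hxs x hx
    rw [PySem.List.mem_sorted]
    rw [PySem.List.mem_sorted] at hx
    rw [PySem.Set.mem_union, PySem.Set.mem_ofList, PySem.Set.mem_ofList]
    exact hxs x hx
  have hB : (PySem.List.sorted
        (PySem.Set.union (PySem.Set.ofList left) (PySem.Set.ofList right))
        (fun x => x) true).foldl
          (bStep (left.foldl (fun d v => d.modify v 0 (· + 1)) PySem.Dict.empty)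
            (right.foldl (fun d v => d.modify v 0 (· + 1)) PySem.Dict.empty)) ([], [], [])
      = mergeSpec (PySem.List.sorted left (fun x => x) true)
          (PySem.List.sorted right (fun x => x) true) := by
    rw [show bStep (left.foldl (fun d v => d.modify v 0 (· + 1)) PySem.Dict.empty)
          (right.foldl (fun d v => d.modify v 0 (· + 1)) PySem.Dict.empty)
        = specStep (fun u => left.count u) (fun u => right.count u) from
      funext fun acc => funext fun v => bStep_eq_specStep left right acc v]
    rw [show (fun u => left.count u)
        = (fun u => (PySem.List.sorted left (fun x => x) true).count u) from
      funext fun u => ((PySem.List.sorted_perm left _ true).count_eq u).symm]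
    rw [show (fun u => right.count u)
        = (fun u => (PySem.List.sorted right (fun x => x) true).count u) from
      funext fun u => ((PySem.List.sorted_perm right _ true).count_eq u).symm]
    exact merge_fold _ _ _ hkeysp
      (PySem.List.sorted_pairwise_rev left (fun x : Int => x))
      (PySem.List.sorted_pairwise_rev right (fun x : Int => x))
      (hmem left (fun x hx => Or.inl hx))
      (hmem right (fun x hx => Or.inr hx))
  simp only [lbr_reverse_py, lbr_reverse_py_alt]
  rw [hA, hB]

-- ===== VERDICT (by name: the statement is the Claim_ definition above) =====
theorem lbr_reverse_py_spec : Claim_equal_lbr_reverse_py := by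
  intro left right _
  unfold Spec_lbr_reverse_py
  exact lbr_ports_eq left right
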